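-- pv_equiv track=rewrite | github.com/hvitoi/tech-docs | computer-science/algorithms/challenges/subproblem/occurences-in-sorted-array/main.py | occurrences_with_trie
-- ===== SOURCE A (Python) =====
-- class TrieNode:
--     def __init__(self):
--         self.children = {}
--         self.end_of_word = False
--
-- class Trie:
--     def __init__(self):
--         self.root = TrieNode()
--
--     def insert(self, word: str):
--         node = self.root
--
--         for c in word:
--             if c not in node.children:
--                 node.children[c] = TrieNode()
--             node = node.children[c]
--
--         node.end_of_word = True
--
-- def occurrences_with_trie(arr: list[str], prefix: str) -> int:
--     def count_downstream_nodes(node: TrieNode):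
--         counter = 1
--
--         for c in node.children:
--             counter += count_downstream_nodes(node.children[c])
--
--         return counter
--
--     trie = Trie()
--     for word in arr:
--         trie.insert(word)
--
--     node = trie.root
--     for c in prefix:
--         if c not in node.children:
--             return 0
--         node = node.children[c]
--
--     return count_downstream_nodes(node)
-- ===== SOURCE B (Python) =====
-- def occurrences_with_trie(arr: list, prefix: str) -> int:
--     nodes = {""}
--     for w in arr:
--         for k in range(1, len(w) + 1):
--             nodes.add(w[:k])
--     if prefix not in nodes:
--         return 0
--     return sum(1 for s in nodes if s.startswith(prefix))
-- ===== Notes on version B (the rewrite author's own statement) =====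
-- stated objective: simpler
-- what changed: Replaces the hand-built trie (node objects, recursive subtree count) with a set of all word prefixes seeded with the empty string: trie nodes correspond one-to-one to distinct prefixes, so the answer is the number of prefixes in the set extending the query prefix (0 if the query prefix itself is absent).
import Mathlib
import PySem

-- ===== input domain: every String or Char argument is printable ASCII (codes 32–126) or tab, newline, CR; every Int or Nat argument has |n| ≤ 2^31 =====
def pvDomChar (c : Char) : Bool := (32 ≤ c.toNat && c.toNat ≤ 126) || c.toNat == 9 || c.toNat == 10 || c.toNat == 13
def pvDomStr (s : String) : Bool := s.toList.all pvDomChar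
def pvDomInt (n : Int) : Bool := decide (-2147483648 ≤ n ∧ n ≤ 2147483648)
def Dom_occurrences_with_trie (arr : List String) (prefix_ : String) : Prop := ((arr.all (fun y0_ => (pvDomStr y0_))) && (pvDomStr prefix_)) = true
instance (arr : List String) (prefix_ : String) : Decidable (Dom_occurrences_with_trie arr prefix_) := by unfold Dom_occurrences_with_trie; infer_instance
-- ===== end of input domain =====

-- B replaces A's hand-built trie (node objects + recursive subtree count) by the set of all
-- word prefixes (seeded with ""): the answer is the number of stored prefixes extending the
-- query prefix, 0 if the query prefix itself is not among them.  Objective: simpler.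

-- ===== PORT A =====
-- A TrieNode's children dict (Char → TrieNode, insertion order) is the explicit child list TrieC.
mutual
inductive TrieN where
  | mk : Bool → TrieC → TrieN
inductive TrieC where
  | nil : TrieC
  | cons : Char → TrieN → TrieC → TrieC
end

-- dict lookup: first (= only) matching key
def TrieC.find? : TrieC → Char → Option TrieN
  | .nil, _ => none
  | .cons c t r, x => if c = x then some t else TrieC.find? r x

-- dict write: overwrite in place, new keys append at the end
def TrieC.set : TrieC → Char → TrieN → TrieC
  | .nil, x, v => .cons x v .nil
  | .cons c t r, x, v => if c = x then .cons c v r else .cons c t (TrieC.set r x v)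

-- Trie.insert: walk the word, creating missing children; set end_of_word at the end
def TrieN.insertChars : TrieN → List Char → TrieN
  | .mk _ ch, [] => .mk true ch
  | .mk e ch, c :: cs =>
      .mk e (TrieC.set ch c (TrieN.insertChars ((TrieC.find? ch c).getD (.mk false .nil)) cs))

-- the 'for c in prefix' descent loop ('return 0' when a child is missing = none)
def TrieN.findPath : TrieN → List Char → Option TrieN
  | n, [] => some n
  | .mk _ ch, c :: cs =>
      match TrieC.find? ch c with
      | none => none
      | some t => TrieN.findPath t cs

-- count_downstream_nodes
mutual
def TrieN.count : TrieN → Int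
  | .mk _ ch => 1 + TrieC.count ch
def TrieC.count : TrieC → Int
  | .nil => 0
  | .cons _ t r => TrieN.count t + TrieC.count r
end

def occurrences_with_trie (arr : List String) (prefix_ : String) : Int :=
  let t := arr.foldl (fun t w => TrieN.insertChars t w.toList) (.mk false .nil)
  match TrieN.findPath t prefix_.toList with
  | none => 0
  | some n => TrieN.count n

-- ===== PORT B =====
def occurrences_with_trie_alt (arr : List String) (prefix_ : String) : Int :=
  let nodes : PySem.Set String := arr.foldl (fun s w =>
      (PySem.List.pyRange 1 ((PySem.Str.len w : Int) + 1) 1).foldl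
        (fun s k => PySem.Set.add s (PySem.Str.slice w none (some k))) s)
    (PySem.Set.ofList [""])
  if PySem.Set.contains nodes prefix_ then
    ((nodes.countP (fun s => PySem.Str.startswith s prefix_) : Nat) : Int)
  else 0

-- ===== PRECONDITION & SPEC =====
def Spec_occurrences_with_trie (arr : List String) (prefix_ : String) (out : Int) : Prop := out = occurrences_with_trie_alt arr prefix_
instance (arr : List String) (prefix_ : String) (out : Int) : Decidable (Spec_occurrences_with_trie arr prefix_ out) := by unfold Spec_occurrences_with_trie; infer_instance

-- ===== CLAIM (what is proved, stated in full; the proofs are below) =====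
def Claim_equal_occurrences_with_trie : Prop := ∀ (arr : List String) (prefix_ : String), Dom_occurrences_with_trie arr prefix_ → Spec_occurrences_with_trie arr prefix_ (occurrences_with_trie arr prefix_)

-- ===== LEMMAS AND PROOFS =====

-- The set of node paths of a trie (each trie node contributes the string spelling the path to it).
mutual
def TrieN.paths : TrieN → List (List Char)
  | .mk _ ch => [] :: TrieC.paths ch
def TrieC.paths : TrieC → List (List Char)
  | .nil => []
  | .cons c t r => (TrieN.paths t).map (c :: ·) ++ TrieC.paths r
end

def TrieC.keys : TrieC → List Char
  | .nil => []
  | .cons c _ r => c :: TrieC.keys r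

-- well-formedness: children keys are distinct at every node (true of every trie A builds)
mutual
def TrieN.wf : TrieN → Prop
  | .mk _ ch => (TrieC.keys ch).Nodup ∧ TrieC.allwf ch
def TrieC.allwf : TrieC → Prop
  | .nil => True
  | .cons _ t r => TrieN.wf t ∧ TrieC.allwf r
end

theorem nil_mem_pathsN (t : TrieN) : [] ∈ TrieN.paths t := by
  cases t with | mk e ch => simp [TrieN.paths]

theorem nil_not_mem_pathsC : ∀ ch : TrieC, [] ∉ TrieC.paths ch
  | .nil => by simp [TrieC.paths]
  | .cons c t r => by simp [TrieC.paths, nil_not_mem_pathsC r]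

theorem head_mem_keys : ∀ (ch : TrieC) (c : Char) (q : List Char),
    (c :: q) ∈ TrieC.paths ch → c ∈ TrieC.keys ch
  | .nil, c, q => by simp [TrieC.paths]
  | .cons c' t r, c, q => by
    intro h
    simp only [TrieC.paths, List.mem_append, List.mem_map] at h
    rcases h with ⟨p, _, hp⟩ | h
    · cases hp; simp [TrieC.keys]
    · simp [TrieC.keys, head_mem_keys r c q h]

theorem find?_eq_none_iff : ∀ (ch : TrieC) (c : Char),
    TrieC.find? ch c = none ↔ c ∉ TrieC.keys ch
  | .nil, c => by simp [TrieC.find?, TrieC.keys]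
  | .cons c' t r, c => by
    by_cases h : c' = c
    · simp [TrieC.find?, TrieC.keys, h]
    · simp [TrieC.find?, TrieC.keys, h, find?_eq_none_iff r c]
      exact fun _ he => h he.symm

theorem mem_pathsC : ∀ (ch : TrieC) (c : Char) (q : List Char), (TrieC.keys ch).Nodup →
    ((c :: q) ∈ TrieC.paths ch ↔ ∃ t, TrieC.find? ch c = some t ∧ q ∈ TrieN.paths t)
  | .nil, c, q, _ => by simp [TrieC.paths, TrieC.find?]
  | .cons c' t r, c, q, hk => by
    simp only [TrieC.keys, List.nodup_cons] at hk
    by_cases h : c' = c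
    · subst h
      have hnr : (c' :: q) ∉ TrieC.paths r := fun hm => hk.1 (head_mem_keys r c' q hm)
      rw [TrieC.paths, TrieC.find?]
      simp only [if_true, List.mem_append, List.mem_map, Option.some.injEq]
      constructor
      · rintro (⟨p, hp, he⟩ | h2)
        · obtain ⟨rfl⟩ : p = q := by injection he
          exact ⟨t, rfl, hp⟩
        · exact absurd h2 hnr
      · rintro ⟨t', rfl, hq⟩
        exact Or.inl ⟨q, hq, rfl⟩
    · rw [TrieC.paths, TrieC.find?]
      simp only [if_neg h, List.mem_append, List.mem_map]
      rw [mem_pathsC r c q hk.2]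
      constructor
      · rintro (⟨p, hp, he⟩ | h2)
        · exact absurd (List.cons.inj he).1 h
        · exact h2
      · exact fun h2 => Or.inr h2

mutual
theorem countN_eq : ∀ t : TrieN, TrieN.count t = ((TrieN.paths t).length : Int)
  | .mk _ ch => by simp [TrieN.count, TrieN.paths, countC_eq ch]; omega
theorem countC_eq : ∀ ch : TrieC, TrieC.count ch = ((TrieC.paths ch).length : Int)
  | .nil => by simp [TrieC.count, TrieC.paths]
  | .cons c t r => by simp [TrieC.count, TrieC.paths, countN_eq t, countC_eq r]
end

mutual
theorem pathsN_nodup : ∀ t : TrieN, TrieN.wf t → (TrieN.paths t).Nodup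
  | .mk _ ch => fun h => by
      simp only [TrieN.paths, List.nodup_cons]
      exact ⟨nil_not_mem_pathsC ch, pathsC_nodup ch h.1 h.2⟩
theorem pathsC_nodup : ∀ ch : TrieC, (TrieC.keys ch).Nodup → TrieC.allwf ch → (TrieC.paths ch).Nodup
  | .nil => fun _ _ => by simp [TrieC.paths]
  | .cons c t r => fun hk hw => by
      simp only [TrieC.keys, List.nodup_cons] at hk
      simp only [TrieC.allwf] at hw
      simp only [TrieC.paths]
      refine List.Nodup.append ?_ (pathsC_nodup r hk.2 hw.2) ?_
      · exact (pathsN_nodup t hw.1).map (fun a b h => by injection h)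
      · intro p hp hpr
        simp only [List.mem_map] at hp
        rcases hp with ⟨q, _, rfl⟩
        exact hk.1 (head_mem_keys r c q hpr)
end

theorem wf_of_find? : ∀ ch : TrieC, TrieC.allwf ch → ∀ c t, TrieC.find? ch c = some t → TrieN.wf t
  | .nil => by intro _ c t h; simp [TrieC.find?] at h
  | .cons c' t' r => by
    intro hw c t h
    simp only [TrieC.allwf] at hw
    by_cases hc : c' = c
    · simp [TrieC.find?, hc] at h; exact h ▸ hw.1
    · simp [TrieC.find?, hc] at h; exact wf_of_find? r hw.2 c t h

theorem countP_pathsC : ∀ (ch : TrieC) (c : Char) (cs : List Char), (TrieC.keys ch).Nodup →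
    (TrieC.paths ch).countP (fun q => decide ((c :: cs) <+: q)) =
      (match TrieC.find? ch c with
       | some t => (TrieN.paths t).countP (fun q => decide (cs <+: q))
       | none => 0)
  | .nil, c, cs, _ => by simp [TrieC.paths, TrieC.find?]
  | .cons c' t r, c, cs, hk => by
    simp only [TrieC.keys, List.nodup_cons] at hk
    rw [TrieC.paths, List.countP_append, List.countP_map]
    by_cases h : c' = c
    · subst h
      have hr : (TrieC.paths r).countP (fun q => decide ((c' :: cs) <+: q)) = 0 := by
        rw [List.countP_eq_zero]
        intro q hq
        simp only [decide_eq_true_eq]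
        intro hpre
        rcases hpre with ⟨s, rfl⟩
        exact hk.1 (head_mem_keys r c' _ hq)
      simp only [TrieC.find?, hr, Nat.add_zero]
      congr 1
      funext q
      simp [List.cons_prefix_cons]
    · have hz : (TrieN.paths t).countP ((fun q => decide ((c :: cs) <+: q)) ∘ (c' :: ·)) = 0 := by
        rw [List.countP_eq_zero]
        intro q _
        simp only [Function.comp_apply, decide_eq_true_eq, List.cons_prefix_cons, not_and]
        intro he; exact absurd he.symm h
      rw [hz, Nat.zero_add, countP_pathsC r c cs hk.2]
      simp [TrieC.find?, h]

theorem findPath_countP : ∀ (p : List Char) (t : TrieN), TrieN.wf t →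
    (TrieN.paths t).countP (fun q => decide (p <+: q)) =
      (match TrieN.findPath t p with
       | some n => (TrieN.paths n).length
       | none => 0) := by
  intro p
  induction p with
  | nil =>
    intro t _
    simp only [TrieN.findPath]
    rw [List.countP_eq_length.mpr]
    intro q _; simp
  | cons c cs ih =>
    intro t hw
    cases t with | mk e ch =>
    simp only [TrieN.wf] at hw
    rw [TrieN.paths, List.countP_cons]
    rw [countP_pathsC ch c cs hw.1]
    simp only [List.prefix_nil, List.cons_ne_nil, decide_false]
    cases hf : TrieC.find? ch c with
    | none => simp [TrieN.findPath, hf]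
    | some t' =>
      simp only [TrieN.findPath, hf]
      exact ih t' (wf_of_find? ch hw.2 c t' hf)

theorem mem_paths_iff_findPath : ∀ (p : List Char) (t : TrieN), TrieN.wf t →
    (p ∈ TrieN.paths t ↔ (TrieN.findPath t p).isSome) := by
  intro p
  induction p with
  | nil => intro t _; simp [TrieN.findPath, nil_mem_pathsN t]
  | cons c cs ih =>
    intro t hw
    cases t with | mk e ch =>
    simp only [TrieN.wf] at hw
    rw [TrieN.paths, List.mem_cons]
    simp only [List.cons_ne_nil, false_or]  -- c::cs ≠ []
    rw [mem_pathsC ch c cs hw.1]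
    cases hf : TrieC.find? ch c with
    | none => simp [TrieN.findPath, hf]
    | some t' =>
      simp only [TrieN.findPath, hf, Option.some.injEq]
      constructor
      · rintro ⟨t'', ht'', hm⟩
        cases ht''
        exact (ih t' (wf_of_find? ch hw.2 c t' hf)).mp hm
      · intro h
        exact ⟨t', rfl, (ih t' (wf_of_find? ch hw.2 c t' hf)).mpr h⟩

theorem keys_set : ∀ (ch : TrieC) (c : Char) (v : TrieN),
    TrieC.keys (TrieC.set ch c v) = if c ∈ TrieC.keys ch then TrieC.keys ch else TrieC.keys ch ++ [c]
  | .nil, c, v => by simp [TrieC.set, TrieC.keys]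
  | .cons c' t r, c, v => by
    by_cases h : c' = c
    · simp [TrieC.set, TrieC.keys, h]
    · simp only [TrieC.set, if_neg h, TrieC.keys, keys_set r c v, List.mem_cons]
      have : ¬ c = c' := fun h' => h h'.symm
      by_cases hm : c ∈ TrieC.keys r <;> simp [hm, this]

theorem find?_set : ∀ (ch : TrieC) (c x : Char) (v : TrieN),
    TrieC.find? (TrieC.set ch c v) x = if c = x then some v else TrieC.find? ch x
  | .nil, c, x, v => by simp [TrieC.set, TrieC.find?]
  | .cons c' t r, c, x, v => by
    by_cases h : c' = c
    · subst h
      by_cases hx : c' = x <;> simp [TrieC.set, TrieC.find?, hx]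
    · simp only [TrieC.set, if_neg h]
      by_cases hx : c' = x
      · subst hx
        have : ¬ c = c' := fun h' => h h'.symm
        simp [TrieC.find?, this]
      · simp [TrieC.find?, hx, find?_set r c x v]

theorem find?_set_self (ch : TrieC) (c : Char) (v : TrieN) :
    TrieC.find? (TrieC.set ch c v) c = some v := by
  rw [find?_set]; exact if_pos rfl

theorem find?_set_ne (ch : TrieC) (c x : Char) (v : TrieN) (h : ¬ c = x) :
    TrieC.find? (TrieC.set ch c v) x = TrieC.find? ch x := by
  rw [find?_set]; exact if_neg h

theorem keys_append_nodup {ks : List Char} {c : Char} (h1 : ks.Nodup) (hm : c ∉ ks) :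
    (ks ++ [c]).Nodup := by
  refine List.nodup_append.mpr ⟨h1, List.nodup_singleton c, ?_⟩
  intro a ha b hb
  simp only [List.mem_singleton] at hb
  subst hb
  exact fun he => hm (he ▸ ha)

theorem allwf_set : ∀ (ch : TrieC) (c : Char) (v : TrieN), TrieC.allwf ch → TrieN.wf v →
    TrieC.allwf (TrieC.set ch c v)
  | .nil, c, v, hw, hv => by simp [TrieC.set, TrieC.allwf, hv]
  | .cons c' t r, c, v, hw, hv => by
    simp only [TrieC.allwf] at hw
    by_cases h : c' = c
    · simp [TrieC.set, h, TrieC.allwf, hv, hw.2]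
    · simp [TrieC.set, h, TrieC.allwf, hw.1, allwf_set r c v hw.2 hv]

theorem wf_empty : TrieN.wf (.mk false .nil) := by
  simp [TrieN.wf, TrieC.keys, TrieC.allwf]

theorem wf_child (ch : TrieC) (c : Char) (hw : TrieC.allwf ch) :
    TrieN.wf ((TrieC.find? ch c).getD (.mk false .nil)) := by
  cases hf : TrieC.find? ch c with
  | none => simpa using wf_empty
  | some t => simpa using wf_of_find? ch hw c t hf

theorem wf_insert : ∀ (cs : List Char) (t : TrieN), TrieN.wf t → TrieN.wf (TrieN.insertChars t cs) := by
  intro cs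
  induction cs with
  | nil => intro t h; cases t with | mk e ch => exact h
  | cons c cs ih =>
    intro t h
    cases t with | mk e ch =>
    simp only [TrieN.wf] at h ⊢
    simp only [TrieN.insertChars]
    constructor
    · rw [keys_set]
      by_cases hm : c ∈ TrieC.keys ch
      · simp [hm, h.1]
      · simp only [hm, if_false]
        exact keys_append_nodup h.1 hm
    · exact allwf_set _ _ _ h.2 (ih _ (wf_child ch c h.2))

theorem mem_paths_insert : ∀ (cs : List Char) (t : TrieN), TrieN.wf t → ∀ q : List Char,
    (q ∈ TrieN.paths (TrieN.insertChars t cs) ↔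
      q ∈ TrieN.paths t ∨ ∃ k, k ≤ cs.length ∧ q = cs.take k) := by
  intro cs
  induction cs with
  | nil =>
    intro t _ q
    cases t with | mk e ch =>
    simp only [TrieN.insertChars, TrieN.paths, List.length_nil, List.take_nil]
    constructor
    · exact fun h => Or.inl h
    · rintro (h | ⟨k, _, rfl⟩)
      · exact h
      · exact List.mem_cons_self
  | cons c cs ih =>
    intro t hw q
    cases t with | mk e ch =>
    simp only [TrieN.wf] at hw
    simp only [TrieN.insertChars, TrieN.paths]
    have hkeys : (TrieC.keys (TrieC.set ch c (TrieN.insertChars ((TrieC.find? ch c).getD (.mk false .nil)) cs))).Nodup := by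
      rw [keys_set]
      by_cases hm : c ∈ TrieC.keys ch
      · simp [hm, hw.1]
      · simp only [hm, if_false]; exact keys_append_nodup hw.1 hm
    cases q with
    | nil => simp
    | cons c' q' =>
      simp only [List.mem_cons, List.cons_ne_nil, false_or]
      rw [mem_pathsC _ c' q' hkeys]
      have htake : (∃ k, k ≤ (c :: cs).length ∧ c' :: q' = (c :: cs).take k) ↔
          (c' = c ∧ ∃ k', k' ≤ cs.length ∧ q' = cs.take k') := by
        constructor
        · rintro ⟨k, hk, he⟩
          cases k with
          | zero => simp at he
          | succ k' =>
            simp only [List.take_succ_cons, List.cons.injEq] at he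
            exact ⟨he.1, k', by simpa using hk, he.2⟩
        · rintro ⟨rfl, k', hk', rfl⟩
          exact ⟨k' + 1, by simpa using hk', by simp⟩
      by_cases hc : c = c'
      · subst hc
        rw [find?_set_self]
        simp only [Option.some.injEq]
        have hwc := wf_child ch c hw.2
        constructor
        · rintro ⟨t', rfl, hm⟩
          rcases (ih _ hwc q').mp hm with hm' | ⟨k', hk', rfl⟩
          · cases hf : TrieC.find? ch c with
            | none => simp [hf, TrieN.paths, TrieC.paths] at hm'
                      exact Or.inr (htake.mpr ⟨rfl, 0, by omega, by simp [hm']⟩)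
            | some t0 =>
              left
              rw [mem_pathsC _ c q' hw.1]
              exact ⟨t0, hf, by simpa [hf] using hm'⟩
          · exact Or.inr (htake.mpr ⟨rfl, k', hk', rfl⟩)
        · rintro (hm | hk)
          · rw [mem_pathsC _ c q' hw.1] at hm
            rcases hm with ⟨t0, hf, hm⟩
            exact ⟨_, rfl, (ih _ hwc q').mpr (Or.inl (by simp [hf]; exact hm))⟩
          · rcases htake.mp hk with ⟨_, k', hk', rfl⟩
            exact ⟨_, rfl, (ih _ hwc _).mpr (Or.inr ⟨k', hk', rfl⟩)⟩
      · have hc' : ¬ c' = c := fun h => hc h.symm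
        rw [find?_set_ne _ _ _ _ hc]
        rw [← mem_pathsC _ c' q' hw.1]
        have hnt : ¬ (∃ k, k ≤ (c :: cs).length ∧ c' :: q' = (c :: cs).take k) := by
          intro h; exact hc' (htake.mp h).1
        constructor
        · exact fun hm => Or.inl hm
        · rintro (hm | ⟨k, hk, he⟩)
          · exact hm
          · exact absurd ⟨k, hk, he⟩ hnt

-- the trie A builds from arr
theorem build_wf (arr : List String) : ∀ t : TrieN, TrieN.wf t →
    TrieN.wf (arr.foldl (fun t w => TrieN.insertChars t w.toList) t) := by
  induction arr with
  | nil => intro t h; exact h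
  | cons w arr ih =>
    intro t h
    exact ih _ (wf_insert w.toList t h)

theorem build_mem (arr : List String) : ∀ t : TrieN, TrieN.wf t → ∀ q : List Char,
    (q ∈ TrieN.paths (arr.foldl (fun t w => TrieN.insertChars t w.toList) t) ↔
      q ∈ TrieN.paths t ∨ ∃ w ∈ arr, ∃ k, k ≤ w.toList.length ∧ q = w.toList.take k) := by
  induction arr with
  | nil => intro t _ q; simp
  | cons w arr ih =>
    intro t hw q
    simp only [List.foldl_cons]
    rw [ih _ (wf_insert w.toList t hw) q, mem_paths_insert w.toList t hw q]
    simp only [List.mem_cons]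
    constructor
    · rintro ((h | h) | ⟨w', hw', h⟩)
      · exact Or.inl h
      · exact Or.inr ⟨w, Or.inl rfl, h⟩
      · exact Or.inr ⟨w', Or.inr hw', h⟩
    · rintro (h | ⟨w', (rfl | hw'), h⟩)
      · exact Or.inl (Or.inl h)
      · exact Or.inl (Or.inr h)
      · exact Or.inr ⟨w', hw', h⟩

-- the set B builds from arr (its membership and distinctness)
theorem inner_step (w : String) (s0 : PySem.Set String) :
    (PySem.List.pyRange 1 ((PySem.Str.len w : Int) + 1) 1).foldl
      (fun s k => PySem.Set.add s (PySem.Str.slice w none (some k))) s0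
    = PySem.Set.update s0 ((PySem.List.pyRange 1 ((PySem.Str.len w : Int) + 1) 1).map
        (fun k => PySem.Str.slice w none (some k))) := by
  rw [PySem.Set.update_map_eq_foldl_add]

theorem nodes_mem (arr : List String) : ∀ (s0 : PySem.Set String) (x : String),
    (x ∈ arr.foldl (fun s w =>
        (PySem.List.pyRange 1 ((PySem.Str.len w : Int) + 1) 1).foldl
          (fun s k => PySem.Set.add s (PySem.Str.slice w none (some k))) s) s0 ↔
      x ∈ s0 ∨ ∃ w ∈ arr, ∃ k : Int, 1 ≤ k ∧ k ≤ (w.toList.length : Int) ∧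
        x = PySem.Str.slice w none (some k)) := by
  induction arr with
  | nil => intro s0 x; simp
  | cons w arr ih =>
    intro s0 x
    simp only [List.foldl_cons]
    rw [ih, inner_step]
    rw [PySem.Set.mem_update]
    simp only [List.mem_map, PySem.List.mem_pyRange_one, List.mem_cons]
    constructor
    · rintro ((hx | ⟨k, ⟨hk1, hk2⟩, rfl⟩) | ⟨w', hw', hk⟩)
      · exact Or.inl hx
      · exact Or.inr ⟨w, Or.inl rfl, k, hk1, by simpa using hk2, rfl⟩
      · exact Or.inr ⟨w', Or.inr hw', hk⟩
    · rintro (hx | ⟨w', (rfl | hw'), k, hk1, hk2, rfl⟩)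
      · exact Or.inl (Or.inl hx)
      · exact Or.inl (Or.inr ⟨k, ⟨hk1, by simpa using Int.lt_add_one_of_le hk2⟩, rfl⟩)
      · exact Or.inr ⟨w', hw', k, hk1, hk2, rfl⟩

theorem nodes_nodup (arr : List String) : ∀ s0 : PySem.Set String, s0.Nodup →
    (arr.foldl (fun s w =>
        (PySem.List.pyRange 1 ((PySem.Str.len w : Int) + 1) 1).foldl
          (fun s k => PySem.Set.add s (PySem.Str.slice w none (some k))) s) s0).Nodup := by
  induction arr with
  | nil => intro s0 h; exact h
  | cons w arr ih =>
    intro s0 h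
    simp only [List.foldl_cons]
    exact ih _ (by rw [inner_step]; exact PySem.Set.nodup_update _ _ h)

theorem slice_toList (w : String) (k : Int) (h : 0 ≤ k) :
    (PySem.Str.slice w none (some k)).toList = w.toList.take k.toNat := by
  simp [PySem.Str.slice, PySem.List.slice_to _ h]

-- ===== VERDICT (by name: the statement is the Claim_ definition above) =====
theorem occurrences_with_trie_spec : Claim_equal_occurrences_with_trie := by
  intro arr p _
  unfold Spec_occurrences_with_trie
  simp only [occurrences_with_trie, occurrences_with_trie_alt]
  set T := arr.foldl (fun t w => TrieN.insertChars t w.toList) (.mk false .nil) with hT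
  set N := arr.foldl (fun s w =>
      (PySem.List.pyRange 1 ((PySem.Str.len w : Int) + 1) 1).foldl
        (fun s k => PySem.Set.add s (PySem.Str.slice w none (some k))) s)
    (PySem.Set.ofList [""]) with hN
  have hwfT : TrieN.wf T := build_wf arr _ wf_empty
  have hNnd : N.Nodup := nodes_nodup arr _ (PySem.Set.nodup_ofList _)
  -- membership transfer: the node paths of T are exactly the toLists of B's set
  have hmm : ∀ q : List Char, q ∈ N.map String.toList ↔ q ∈ TrieN.paths T := by
    intro q
    rw [List.mem_map]
    rw [build_mem arr _ wf_empty q]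
    have hbase : q ∈ TrieN.paths (.mk false .nil) ↔ q = [] := by
      simp [TrieN.paths, TrieC.paths]
    rw [hbase]
    constructor
    · rintro ⟨s, hs, rfl⟩
      rcases (nodes_mem arr _ s).mp hs with hs0 | ⟨w, hw, k, hk1, hk2, rfl⟩
      · left
        have : s = "" := by simpa [PySem.Set.mem_ofList] using hs0
        simp [this]
      · right
        refine ⟨w, hw, k.toNat, by omega, ?_⟩
        exact slice_toList w k (by omega)
    · rintro (rfl | ⟨w, hw, k, hk, rfl⟩)
      · exact ⟨"", (nodes_mem arr _ "").mpr (Or.inl (by simp [PySem.Set.mem_ofList])), rfl⟩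
      · cases k with
        | zero =>
          exact ⟨"", (nodes_mem arr _ "").mpr (Or.inl (by simp [PySem.Set.mem_ofList])), by simp⟩
        | succ k' =>
          refine ⟨PySem.Str.slice w none (some ((k' + 1 : Nat) : Int)),
            (nodes_mem arr _ _).mpr (Or.inr ⟨w, hw, ((k' + 1 : Nat) : Int), by omega, by exact_mod_cast hk, rfl⟩), ?_⟩
          rw [slice_toList w _ (by omega)]
          simp
  have hmapnd : (N.map String.toList).Nodup := hNnd.map (fun a b hab => String.toList_inj.mp hab)
  have hperm : (N.map String.toList).Perm (TrieN.paths T) :=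
    (List.perm_ext_iff_of_nodup hmapnd (pathsN_nodup T hwfT)).mpr hmm
  have hcountP : (N.countP (fun s => PySem.Str.startswith s p) : Nat) =
      (TrieN.paths T).countP (fun q => decide (p.toList <+: q)) := by
    rw [← List.Perm.countP_congr hperm (fun x _ => rfl), List.countP_map]
    refine List.countP_congr ?_
    intro s _
    simp only [Function.comp_apply]
    by_cases h : p.toList <+: s.toList
    · rw [decide_eq_true h]
      simpa using (PySem.Chars.startswith_iff s.toList p.toList).mpr h
    · rw [decide_eq_false h]
      constructor
      · intro hb
        exact absurd ((PySem.Chars.startswith_iff s.toList p.toList).mp (by simpa using hb)) h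
      · intro hb; exact absurd hb (by simp)
  have hfc := findPath_countP p.toList T hwfT
  cases hf : TrieN.findPath T p.toList with
  | none =>
    have hnc : ¬ (PySem.Set.contains N p = true) := by
      intro hcb
      have hpN : p ∈ N := (PySem.Set.contains_iff N p).mp hcb
      have h1 : p.toList ∈ TrieN.paths T := (hmm p.toList).mp (List.mem_map_of_mem hpN)
      have h2 := (mem_paths_iff_findPath p.toList T hwfT).mp h1
      rw [hf] at h2
      simp at h2
    rw [if_neg hnc]
  | some n =>
    have hpN : PySem.Set.contains N p = true := by
      have hisome : (TrieN.findPath T p.toList).isSome := by rw [hf]; rfl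
      have hmem : p.toList ∈ TrieN.paths T := (mem_paths_iff_findPath p.toList T hwfT).mpr hisome
      rcases List.mem_map.mp ((hmm p.toList).mpr hmem) with ⟨s, hs, he⟩
      exact (PySem.Set.contains_iff N p).mpr (String.toList_inj.mp he ▸ hs)
    rw [hf] at hfc
    rw [if_pos hpN]
    show TrieN.count n = _
    rw [countN_eq n, hcountP, hfc]
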